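-- pv_equiv track=rewrite | github.com/stromtroopertk421/qDiffusion_Updateproject | source/launch.py | _consume_qt_trace_flag
-- ===== SOURCE A (Python) =====
-- QT_TRACE_FLAG = "--qt-trace"
--
-- def _consume_qt_trace_flag(argv):
--     filtered = [argv[0]]
--     qt_trace_enabled = False
--
--     for arg in argv[1:]:
--         lowered = arg.lower()
--         if lowered == QT_TRACE_FLAG:
--             qt_trace_enabled = True
--             continue
--         if lowered.startswith(QT_TRACE_FLAG + "="):
--             value = lowered.split("=", 1)[1].strip()
--             if value not in {"0", "false", "no", "off"}:
--                 qt_trace_enabled = True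
--             continue
--         filtered.append(arg)
--
--     return filtered, qt_trace_enabled
-- ===== SOURCE B (Python) =====
-- QT_TRACE_FLAG = "--qt-trace"
-- _DISABLING = ("0", "false", "no", "off")
--
-- def _is_flag(lowered):
--     return lowered == QT_TRACE_FLAG or lowered.startswith(QT_TRACE_FLAG + "=")
--
-- def _is_enable(lowered):
--     if lowered == QT_TRACE_FLAG:
--         return True
--     if lowered.startswith(QT_TRACE_FLAG + "="):
--         return lowered.split("=", 1)[1].strip() not in _DISABLING
--     return False
--
-- def _consume_qt_trace_flag(argv):
--     rest = argv[1:]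
--     qt_trace_enabled = any(_is_enable(arg.lower()) for arg in rest)
--     filtered = [argv[0]] + [arg for arg in rest if not _is_flag(arg.lower())]
--     return filtered, qt_trace_enabled
-- ===== Notes on version B (the rewrite author's own statement) =====
-- stated objective: simpler
-- what changed: Replaces the single stateful accumulating loop with two independent declarative passes over argv[1:]: an any() over an is-enable predicate for the flag state, and a filter over an is-flag predicate for the kept arguments.
import Mathlib
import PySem

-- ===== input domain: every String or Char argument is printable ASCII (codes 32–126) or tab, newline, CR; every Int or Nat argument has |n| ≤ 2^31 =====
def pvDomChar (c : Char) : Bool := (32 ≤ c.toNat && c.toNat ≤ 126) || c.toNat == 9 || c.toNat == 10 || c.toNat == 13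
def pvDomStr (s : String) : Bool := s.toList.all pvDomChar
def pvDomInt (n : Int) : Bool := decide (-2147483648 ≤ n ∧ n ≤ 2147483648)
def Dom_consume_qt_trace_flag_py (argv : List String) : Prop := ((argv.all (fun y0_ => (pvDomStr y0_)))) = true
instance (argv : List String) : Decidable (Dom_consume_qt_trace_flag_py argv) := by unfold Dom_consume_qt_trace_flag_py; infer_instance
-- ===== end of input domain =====

-- B replaces A's single stateful accumulating loop with two independent passes
-- (an any-predicate for the flag, a filter for the kept args); equal on all non-empty argv.

-- ===== PORT A =====
-- the value computed by `lowered.split("=", 1)[1].strip()`; under the startswith guard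
-- the split always has a second piece, so the `.getD ""` default is never used (exact there)
def qtSplitVal (lowered : String) : String :=
  PySem.Str.strip ((((PySem.Str.splitMax? lowered "=" 1).getD []).getD 1 ""))

def qtBodyA (st : List String × Bool) (arg : String) : List String × Bool :=
  let lowered := PySem.Str.lower arg
  if lowered == "--qt-trace" then (st.1, true)
  else if PySem.Str.startswith lowered "--qt-trace=" then
    let value := qtSplitVal lowered
    if value == "0" || value == "false" || value == "no" || value == "off" then st
    else (st.1, true)
  else (st.1 ++ [arg], st.2)

-- A raises IndexError on []; the [] branch here is outside Pre_
def consume_qt_trace_flag_py (argv : List String) : List String × Bool :=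
  match argv with
  | [] => ([], false)
  | a0 :: rest => rest.foldl qtBodyA ([a0], false)

-- ===== PORT B =====
def qtIsFlag (lowered : String) : Bool :=
  lowered == "--qt-trace" || PySem.Str.startswith lowered "--qt-trace="

def qtIsEnable (lowered : String) : Bool :=
  if lowered == "--qt-trace" then true
  else if PySem.Str.startswith lowered "--qt-trace=" then
    !(qtSplitVal lowered == "0" || qtSplitVal lowered == "false" ||
      qtSplitVal lowered == "no" || qtSplitVal lowered == "off")
  else false

-- B raises IndexError on [] too; the [] branch here is outside Pre_
def consume_qt_trace_flag_py_alt (argv : List String) : List String × Bool :=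
  match argv with
  | [] => ([], false)
  | a0 :: rest =>
    let enabled := rest.any (fun arg => qtIsEnable (PySem.Str.lower arg))
    let filtered := a0 :: rest.filter (fun arg => !qtIsFlag (PySem.Str.lower arg))
    (filtered, enabled)

-- ===== PRECONDITION & SPEC =====
-- Pre_ excludes only the empty argv, on which Python A raises IndexError (argv[0])
def Pre_consume_qt_trace_flag_py (argv : List String) : Prop := argv ≠ []
instance (argv : List String) : Decidable (Pre_consume_qt_trace_flag_py argv) := by unfold Pre_consume_qt_trace_flag_py; infer_instance

def pvWitness_consume_qt_trace_flag_py : List String := ["prog", "--qt-trace=off", "x"]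

def Spec_consume_qt_trace_flag_py (argv : List String) (out : List String × Bool) : Prop := out = consume_qt_trace_flag_py_alt argv
instance (argv : List String) (out : List String × Bool) : Decidable (Spec_consume_qt_trace_flag_py argv out) := by unfold Spec_consume_qt_trace_flag_py; infer_instance

-- ===== CLAIM (what is proved, stated in full; the proofs are below) =====
def Claim_equal_consume_qt_trace_flag_py : Prop := ∀ (argv : List String), Dom_consume_qt_trace_flag_py argv → Pre_consume_qt_trace_flag_py argv → Spec_consume_qt_trace_flag_py argv (consume_qt_trace_flag_py argv)

-- ===== LEMMAS AND PROOFS =====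

-- loop invariant: A's fold computes the filter and a monotone OR of the enable predicate
theorem qtFoldA_eq (rest : List String) (acc : List String) (en : Bool) :
    rest.foldl qtBodyA (acc, en) =
      (acc ++ rest.filter (fun arg => !qtIsFlag (PySem.Str.lower arg)),
       en || rest.any (fun arg => qtIsEnable (PySem.Str.lower arg))) := by
  induction rest generalizing acc en with
  | nil => simp
  | cons x xs ih =>
    simp only [List.foldl_cons, List.filter_cons, List.any_cons]
    by_cases h1 : PySem.Str.lower x = "--qt-trace"
    · simp [qtBodyA, qtIsFlag, qtIsEnable, h1, ih]
    · by_cases h2 : PySem.Chars.startswith (PySem.Chars.lower x.toList)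
          ['-', '-', 'q', 't', '-', 't', 'r', 'a', 'c', 'e', '='] = true
      · by_cases h3 : ((qtSplitVal (PySem.Str.lower x) = "0" ∨ qtSplitVal (PySem.Str.lower x) = "false") ∨
            qtSplitVal (PySem.Str.lower x) = "no") ∨ qtSplitVal (PySem.Str.lower x) = "off"
        · simp only [qtBodyA, qtIsFlag, qtIsEnable, ih]
          simp [h1, h2, h3]
          rcases h3 with ((h | h) | h) | h <;> simp [h]
        · simp only [qtBodyA, qtIsFlag, qtIsEnable, ih]
          simp [h1, h2, h3]
          push Not at h3
          exact Or.inr (Or.inl h3)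
      · simp [qtBodyA, qtIsFlag, qtIsEnable, h1, h2, ih]

-- ===== VERDICT (by name: the statement is the Claim_ definition above) =====
theorem consume_qt_trace_flag_py_spec : Claim_equal_consume_qt_trace_flag_py := by
  intro argv _ hpre
  match argv, hpre with
  | a0 :: rest, _ =>
    show consume_qt_trace_flag_py (a0 :: rest) = consume_qt_trace_flag_py_alt (a0 :: rest)
    simp [consume_qt_trace_flag_py, consume_qt_trace_flag_py_alt, qtFoldA_eq]
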